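-- pv_equiv track=rewrite | github.com/ymernisba1564u0/dimos | dimos/core/test_modules.py | is_module_subclass
-- ===== SOURCE A (Python) =====
-- def is_module_subclass(
--     base_classes: list[str],
--     aliases: dict[str, str],
--     class_hierarchy: dict[str, list[str]] | None = None,
--     current_module_path: str | None = None,
-- ) -> bool:
--     """Check if any base class is or resolves to dimos.core.Module or its variants (recursively)."""
--     target_classes = {
--         "Module",
--         "ModuleBase",
--         "DaskModule",
--         "dimos.core.Module",
--         "dimos.core.ModuleBase",
--         "dimos.core.DaskModule",
--         "dimos.core.module.Module",
--         "dimos.core.module.ModuleBase",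
--         "dimos.core.module.DaskModule",
--     }
--
--     def find_qualified_name(base: str, context_module: str | None = None) -> str:
--         """Find the qualified name for a base class, using import context if available."""
--         if not class_hierarchy:
--             return base
--
--         # First try exact match (already fully qualified or in hierarchy)
--         if base in class_hierarchy:
--             return base
--
--         # Check if it's in our aliases (from imports)
--         if base in aliases:
--             resolved = aliases[base]
--             if resolved in class_hierarchy:
--                 return resolved
--             # The resolved name might be a qualified name that exists
--             return resolved
--
--         # If we have a context module and base is a simple name,
--         # try to find it in the same module first (for local classes)
--         if context_module and "." not in base:
--             same_module_qualified = f"{context_module}.{base}"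
--             if same_module_qualified in class_hierarchy:
--                 return same_module_qualified
--
--         # Otherwise return the base as-is
--         return base
--
--     def check_base(
--         base: str, visited: set[str] | None = None, context_module: str | None = None
--     ) -> bool:
--         if visited is None:
--             visited = set()
--
--         # Avoid infinite recursion
--         if base in visited:
--             return False
--         visited.add(base)
--
--         # Check direct match
--         if base in target_classes:
--             return True
--
--         # Check if it's an alias
--         if base in aliases:
--             resolved = aliases[base]
--             if resolved in target_classes:
--                 return True
--             # Continue checking with resolved name
--             base = resolved
--
--         # If we have a class hierarchy, recursively check parent classes
--         if class_hierarchy: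
--             # Resolve the base class name to a qualified name
--             qualified_name = find_qualified_name(base, context_module)
--
--             if qualified_name in class_hierarchy:
--                 # Check all parent classes
--                 for parent_base in class_hierarchy[qualified_name]:
--                     if check_base(parent_base, visited, None):  # Parent lookups don't use context
--                         return True
--
--         return False
--
--     for base in base_classes:
--         if check_base(base, context_module=current_module_path):
--             return True
--
--     return False
-- ===== SOURCE B (Python) =====
-- def is_module_subclass(
--     base_classes: list[str],
--     aliases: dict[str, str],
--     class_hierarchy: dict[str, list[str]] | None = None,
--     current_module_path: str | None = None,
-- ) -> bool:
--     """Iterative worklist version: per top-level base, a DFS over an explicit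
--     stack instead of recursion; same result as the recursive original."""
--     target_classes = {
--         "Module",
--         "ModuleBase",
--         "DaskModule",
--         "dimos.core.Module",
--         "dimos.core.ModuleBase",
--         "dimos.core.DaskModule",
--         "dimos.core.module.Module",
--         "dimos.core.module.ModuleBase",
--         "dimos.core.module.DaskModule",
--     }
--
--     def qualify(name: str, ctx: str | None) -> str:
--         # only called when class_hierarchy is non-empty
--         if name in class_hierarchy:
--             return name
--         if name in aliases:
--             return aliases[name]
--         if ctx and "." not in name:
--             q = f"{ctx}.{name}"
--             if q in class_hierarchy:
--                 return q
--         return name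
--
--     for base in base_classes:
--         visited: set[str] = set()
--         stack = [(base, current_module_path)]
--         while stack:
--             b, ctx = stack.pop()
--             if b in visited:
--                 continue
--             visited.add(b)
--             if b in target_classes:
--                 return True
--             if b in aliases:
--                 r = aliases[b]
--                 if r in target_classes:
--                     return True
--                 b = r
--             if class_hierarchy:
--                 q = qualify(b, ctx)
--                 if q in class_hierarchy:
--                     for p in reversed(class_hierarchy[q]):
--                         stack.append((p, None))
--     return False
-- ===== Notes on version B (the rewrite author's own statement) =====
-- stated objective: alternative
-- what changed: Replaced the recursive check_base (recursion with a threaded mutable visited set) by an explicit per-base worklist stack iterated in a while loop, and collapsed find_qualified_name's redundant resolved-name branch.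
import Mathlib
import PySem

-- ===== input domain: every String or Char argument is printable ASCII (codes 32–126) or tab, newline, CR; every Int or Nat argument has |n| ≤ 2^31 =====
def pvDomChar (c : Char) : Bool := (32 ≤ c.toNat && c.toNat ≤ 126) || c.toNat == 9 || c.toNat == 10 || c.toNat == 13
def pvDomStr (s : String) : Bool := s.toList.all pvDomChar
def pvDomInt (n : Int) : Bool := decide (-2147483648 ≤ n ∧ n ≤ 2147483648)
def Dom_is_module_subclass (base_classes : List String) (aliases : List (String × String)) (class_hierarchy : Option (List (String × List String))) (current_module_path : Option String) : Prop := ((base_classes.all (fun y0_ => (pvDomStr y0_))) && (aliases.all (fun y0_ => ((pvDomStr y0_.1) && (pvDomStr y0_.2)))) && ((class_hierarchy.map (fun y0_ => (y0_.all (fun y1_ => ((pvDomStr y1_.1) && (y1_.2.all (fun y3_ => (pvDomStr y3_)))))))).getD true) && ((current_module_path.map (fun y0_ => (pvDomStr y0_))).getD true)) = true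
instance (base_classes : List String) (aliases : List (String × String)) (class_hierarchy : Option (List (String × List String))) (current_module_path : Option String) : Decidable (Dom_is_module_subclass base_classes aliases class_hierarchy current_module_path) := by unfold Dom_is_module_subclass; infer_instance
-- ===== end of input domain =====

-- B replaces A's recursive `check_base` (recursion + threaded mutable visited set) with an
-- explicit worklist stack per top-level base; objective: alternative decomposition, same cost.
--
-- Both ports represent the Python `visited` set by its complement `avail` inside the finite
-- universe of all names the traversal can ever be called on (the top-level bases plus every
-- parent list in the hierarchy): `base in visited` becomes `base ∉ avail` and
-- `visited.add(base)` becomes `avail.erase base`.  This is exact because every argument of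
-- `check_base` (resp. every name popped from the worklist) is a top-level base or a parent
-- from the hierarchy, hence lies in the universe; it is what makes the recursion terminate.

-- ===== PORT A =====
def pvTargets : List String :=
  ["Module", "ModuleBase", "DaskModule",
   "dimos.core.Module", "dimos.core.ModuleBase", "dimos.core.DaskModule",
   "dimos.core.module.Module", "dimos.core.module.ModuleBase", "dimos.core.module.DaskModule"]

-- `find_qualified_name` of A, step for step ("not class_hierarchy" = None or empty dict)
def pvFindQualifiedName (class_hierarchy : Option (List (String × List String))) (aliases : List (String × String)) (base : String) (context_module : Option String) : String :=
  match class_hierarchy with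
  | none => base
  | some h =>
    if h.isEmpty then base
    else if (PySem.Dict.get? ⟨h⟩ base).isSome then base
    else
      match PySem.Dict.get? ⟨aliases⟩ base with
      | some resolved => if (PySem.Dict.get? ⟨h⟩ resolved).isSome then resolved else resolved
      | none =>
        match context_module with
        | some cm =>
          if cm ≠ "" ∧ '.' ∉ base.toList then
            if (PySem.Dict.get? ⟨h⟩ (cm ++ "." ++ base)).isSome then cm ++ "." ++ base
            else base
          else base
        | none => base

-- "if class_hierarchy: qualified = find_qualified_name(...); if qualified in class_hierarchy:"
def pvHierParentsA (class_hierarchy : Option (List (String × List String))) (aliases : List (String × String)) (b : String) (ctx : Option String) : Option (List String) :=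
  match class_hierarchy with
  | none => none
  | some h =>
    if h.isEmpty then none
    else PySem.Dict.get? ⟨h⟩ (pvFindQualifiedName class_hierarchy aliases b ctx)

-- finite universe of every name `check_base` can be called on (for the visited-complement encoding)
def pvAllNames (base_classes : List String) (class_hierarchy : Option (List (String × List String))) : List String :=
  PySem.List.dedup (base_classes ++ (match class_hierarchy with | none => [] | some h => h.flatMap (·.2)))

theorem pv_erase_len_lt {l : List String} {a : String} (h : a ∈ l) : (l.erase a).length < l.length := by
  have h1 := List.length_erase_of_mem h
  have h2 := List.length_pos_of_mem h
  omega

mutual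
-- A's recursive `check_base`; returns (result, remaining avail = complement of visited)
def pvCheckBase (aliases : List (String × String)) (class_hierarchy : Option (List (String × List String))) (base : String) (ctx : Option String) (avail : List String) : Bool × {l : List String // l.length ≤ avail.length} :=
  if hmem : base ∈ avail then
    if base ∈ pvTargets then (true, ⟨avail.erase base, (pv_erase_len_lt hmem).le⟩)
    else
      match PySem.Dict.get? ⟨aliases⟩ base with
      | some resolved =>
        if resolved ∈ pvTargets then (true, ⟨avail.erase base, (pv_erase_len_lt hmem).le⟩)
        else
          match pvHierParentsA class_hierarchy aliases resolved ctx with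
          | some parents =>
            let q := pvCheckList aliases class_hierarchy parents (avail.erase base)
            (q.1, ⟨q.2.1, le_trans q.2.2 (pv_erase_len_lt hmem).le⟩)
          | none => (false, ⟨avail.erase base, (pv_erase_len_lt hmem).le⟩)
      | none =>
          match pvHierParentsA class_hierarchy aliases base ctx with
          | some parents =>
            let q := pvCheckList aliases class_hierarchy parents (avail.erase base)
            (q.1, ⟨q.2.1, le_trans q.2.2 (pv_erase_len_lt hmem).le⟩)
          | none => (false, ⟨avail.erase base, (pv_erase_len_lt hmem).le⟩)
  else (false, ⟨avail, le_refl _⟩)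
  termination_by (avail.length, 0)
  decreasing_by all_goals exact Prod.Lex.left _ _ (pv_erase_len_lt hmem)

-- the `for parent_base in ...: if check_base(parent_base, visited, None): return True` loop
def pvCheckList (aliases : List (String × String)) (class_hierarchy : Option (List (String × List String))) (parents : List String) (avail : List String) : Bool × {l : List String // l.length ≤ avail.length} :=
  match parents with
  | [] => (false, ⟨avail, le_refl _⟩)
  | p :: ps =>
    match pvCheckBase aliases class_hierarchy p none avail with
    | (true, a) => (true, a)
    | (false, a) =>
      let q := pvCheckList aliases class_hierarchy ps a.1
      (q.1, ⟨q.2.1, le_trans q.2.2 a.2⟩)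
  termination_by (avail.length, parents.length + 1)
  decreasing_by
  · exact Prod.Lex.right _ (by simp only [List.length_cons]; omega)
  · rcases Nat.lt_or_ge a.1.length avail.length with h | h
    · exact Prod.Lex.left _ _ h
    · have he : a.1.length = avail.length := le_antisymm a.2 h
      rw [he]; exact Prod.Lex.right _ (by simp only [List.length_cons]; omega)
end

def is_module_subclass (base_classes : List String) (aliases : List (String × String)) (class_hierarchy : Option (List (String × List String))) (current_module_path : Option String) : Bool :=
  base_classes.any (fun base => (pvCheckBase aliases class_hierarchy base current_module_path (pvAllNames base_classes class_hierarchy)).1)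

-- ===== PORT B =====
-- Source B's `qualify` (only called when class_hierarchy is non-empty)
def pvQualify (h : List (String × List String)) (aliases : List (String × String)) (name : String) (ctx : Option String) : String :=
  if (PySem.Dict.get? ⟨h⟩ name).isSome then name
  else
    match PySem.Dict.get? ⟨aliases⟩ name with
    | some r => r
    | none =>
      match ctx with
      | some cm =>
        if cm ≠ "" ∧ '.' ∉ name.toList then
          if (PySem.Dict.get? ⟨h⟩ (cm ++ "." ++ name)).isSome then cm ++ "." ++ name
          else name
        else name
      | none => name

-- "if class_hierarchy: q = qualify(b, ctx); if q in class_hierarchy:"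
def pvParentsB (class_hierarchy : Option (List (String × List String))) (aliases : List (String × String)) (b : String) (ctx : Option String) : Option (List String) :=
  match class_hierarchy with
  | none => none
  | some h =>
    if h.isEmpty then none
    else PySem.Dict.get? ⟨h⟩ (pvQualify h aliases b ctx)

-- Source B's `while stack:` worklist loop; Lean list head = top of the Python stack, so pushing
-- `reversed(parents)` then popping is prepending `parents` in order.
def pvLoop (aliases : List (String × String)) (class_hierarchy : Option (List (String × List String))) (stack : List (String × Option String)) (avail : List String) : Bool :=
  match stack with
  | [] => false
  | (b, ctx) :: rest =>
    if hmem : b ∈ avail then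
      if b ∈ pvTargets then true
      else
        match PySem.Dict.get? ⟨aliases⟩ b with
        | some r =>
          if r ∈ pvTargets then true
          else
            match pvParentsB class_hierarchy aliases r ctx with
            | some ps => pvLoop aliases class_hierarchy (ps.map (fun p => (p, (none : Option String))) ++ rest) (avail.erase b)
            | none => pvLoop aliases class_hierarchy rest (avail.erase b)
        | none =>
          match pvParentsB class_hierarchy aliases b ctx with
          | some ps => pvLoop aliases class_hierarchy (ps.map (fun p => (p, (none : Option String))) ++ rest) (avail.erase b)
          | none => pvLoop aliases class_hierarchy rest (avail.erase b)
    else pvLoop aliases class_hierarchy rest avail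
  termination_by (avail.length, stack.length)
  decreasing_by
  all_goals first
  | exact Prod.Lex.left _ _ (pv_erase_len_lt hmem)
  | exact Prod.Lex.right _ (by simp only [List.length_cons]; omega)

def is_module_subclass_alt (base_classes : List String) (aliases : List (String × String)) (class_hierarchy : Option (List (String × List String))) (current_module_path : Option String) : Bool :=
  base_classes.any (fun base => pvLoop aliases class_hierarchy [(base, current_module_path)] (pvAllNames base_classes class_hierarchy))

-- ===== PRECONDITION & SPEC =====
def Spec_is_module_subclass (base_classes : List String) (aliases : List (String × String)) (class_hierarchy : Option (List (String × List String))) (current_module_path : Option String) (out : Bool) : Prop := out = is_module_subclass_alt base_classes aliases class_hierarchy current_module_path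
instance (base_classes : List String) (aliases : List (String × String)) (class_hierarchy : Option (List (String × List String))) (current_module_path : Option String) (out : Bool) : Decidable (Spec_is_module_subclass base_classes aliases class_hierarchy current_module_path out) := by unfold Spec_is_module_subclass; infer_instance

-- ===== CLAIM (what is proved, stated in full; the proofs are below) =====
def Claim_equal_is_module_subclass : Prop := ∀ (base_classes : List String) (aliases : List (String × String)) (class_hierarchy : Option (List (String × List String))) (current_module_path : Option String), Dom_is_module_subclass base_classes aliases class_hierarchy current_module_path → Spec_is_module_subclass base_classes aliases class_hierarchy current_module_path (is_module_subclass base_classes aliases class_hierarchy current_module_path)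

-- ===== LEMMAS AND PROOFS =====

theorem pvFindQualifiedName_eq_pvQualify (h : List (String × List String)) (aliases : List (String × String)) (b : String) (ctx : Option String) (hh : ¬ h.isEmpty) :
    pvFindQualifiedName (some h) aliases b ctx = pvQualify h aliases b ctx := by
  simp only [pvFindQualifiedName, pvQualify, if_neg hh, ite_self]

theorem pvParents_eq (class_hierarchy : Option (List (String × List String))) (aliases : List (String × String)) (b : String) (ctx : Option String) :
    pvHierParentsA class_hierarchy aliases b ctx = pvParentsB class_hierarchy aliases b ctx := by
  cases class_hierarchy with
  | none => rfl
  | some h =>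
    by_cases hh : h.isEmpty
    · simp [pvHierParentsA, pvParentsB, hh]
    · simp [pvHierParentsA, pvParentsB, hh, pvFindQualifiedName_eq_pvQualify h aliases b ctx hh]

-- the simulation: one pop of B's worklist behaves like one recursive call of A's check_base,
-- and a prefix of parents behaves like A's parent loop
theorem pvKey (aliases : List (String × String)) (class_hierarchy : Option (List (String × List String))) :
    ∀ (n : Nat) (avail : List String), avail.length < n →
      ((∀ (b : String) (ctx : Option String) (rest : List (String × Option String)),
          pvLoop aliases class_hierarchy ((b, ctx) :: rest) avail =
            ((pvCheckBase aliases class_hierarchy b ctx avail).1 ||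
              pvLoop aliases class_hierarchy rest (pvCheckBase aliases class_hierarchy b ctx avail).2.1)) ∧
       (∀ (ps : List String) (rest : List (String × Option String)),
          pvLoop aliases class_hierarchy (ps.map (fun p => (p, (none : Option String))) ++ rest) avail =
            ((pvCheckList aliases class_hierarchy ps avail).1 ||
              pvLoop aliases class_hierarchy rest (pvCheckList aliases class_hierarchy ps avail).2.1))) := by
  intro n
  induction n with
  | zero => intro avail h; omega
  | succ n ih =>
    intro avail hlt
    have hP : ∀ (av : List String), av.length ≤ n → ∀ (b : String) (ctx : Option String) (rest : List (String × Option String)),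
        pvLoop aliases class_hierarchy ((b, ctx) :: rest) av =
          ((pvCheckBase aliases class_hierarchy b ctx av).1 ||
            pvLoop aliases class_hierarchy rest (pvCheckBase aliases class_hierarchy b ctx av).2.1) := by
      intro av hle b ctx rest
      by_cases hmem : b ∈ av
      · have herase : (av.erase b).length < n := lt_of_lt_of_le (pv_erase_len_lt hmem) hle
        rw [pvLoop.eq_def, pvCheckBase.eq_def]
        simp only [dif_pos hmem, pvParents_eq]
        by_cases ht : b ∈ pvTargets
        · simp [ht]
        · simp only [if_neg ht]
          cases hal : PySem.Dict.get? (⟨aliases⟩ : PySem.Dict String String) b with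
          | some r =>
            by_cases htr : r ∈ pvTargets
            · simp [htr]
            · simp only [if_neg htr]
              cases hpar : pvParentsB class_hierarchy aliases r ctx with
              | some ps => exact (ih (av.erase b) herase).2 ps rest
              | none => simp
          | none =>
            cases hpar : pvParentsB class_hierarchy aliases b ctx with
            | some ps => exact (ih (av.erase b) herase).2 ps rest
            | none => simp
      · rw [pvLoop.eq_def, pvCheckBase.eq_def]
        simp [dif_neg hmem]
    have hQ : ∀ (ps : List String) (av : List String), av.length ≤ n → ∀ (rest : List (String × Option String)),
        pvLoop aliases class_hierarchy (ps.map (fun p => (p, (none : Option String))) ++ rest) av =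
          ((pvCheckList aliases class_hierarchy ps av).1 ||
            pvLoop aliases class_hierarchy rest (pvCheckList aliases class_hierarchy ps av).2.1) := by
      intro ps
      induction ps with
      | nil => intro av _ rest; simp [pvCheckList.eq_def]
      | cons p ps ihps =>
        intro av hle rest
        rw [pvCheckList.eq_def]
        simp only [List.map_cons, List.cons_append]
        rw [hP av hle p none (ps.map (fun p => (p, (none : Option String))) ++ rest)]
        cases hcb : pvCheckBase aliases class_hierarchy p none av with
        | mk r a =>
          cases r with
          | true => simp
          | false =>
            simp only [Bool.false_or]
            exact ihps a.1 (le_trans a.2 hle) rest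
    exact ⟨hP avail (Nat.lt_succ_iff.mp hlt), fun ps rest => hQ ps avail (Nat.lt_succ_iff.mp hlt) rest⟩

-- ===== VERDICT (by name: the statement is the Claim_ definition above) =====
theorem is_module_subclass_spec : Claim_equal_is_module_subclass := by
  intro base_classes aliases class_hierarchy current_module_path _
  unfold Spec_is_module_subclass is_module_subclass is_module_subclass_alt
  congr 1
  funext base
  have h := (pvKey aliases class_hierarchy ((pvAllNames base_classes class_hierarchy).length + 1)
      (pvAllNames base_classes class_hierarchy) (by omega)).1 base current_module_path []
  rw [h, pvLoop.eq_def]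
  simp
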